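-- pv_equiv track=rewrite | github.com/bhavna2608/AoC-23 | Day21/part2.5.py | tuktuk
-- ===== SOURCE A (Python) =====
-- def tuktuk(starting, L, count):
--     new_starting = []
--     visited = set()
--     if count < 500:
--         count += 1
--         for x, y in starting:
--             if L[(x-1)%11][y%11] != '#' and (x-1, y) not in visited:
--                 new_starting.append((x-1, y))
--                 visited.add((x-1, y))
--
--             if L[(x+1)%11][y%11] != '#' and (x+1, y) not in visited:
--                 new_starting.append((x+1, y))
--                 visited.add((x+1, y))
--
--             if L[x%11][(y-1)%11] != '#' and (x, y-1) not in visited: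
--                 new_starting.append((x, y-1))
--                 visited.add((x, y-1))
--
--             if L[x%11][(y+1)%11] != '#' and (x, y+1) not in visited:
--                 new_starting.append((x, y+1))
--                 visited.add((x, y+1))
--
--         return tuktuk(new_starting, L, count)
--     return starting
-- ===== SOURCE B (Python) =====
-- def tuktuk(starting, L, count):
--     # Iterative rewrite: one neighbour-offset inner loop instead of four
--     # copied if-blocks, and a fuel loop instead of recursion.
--     frontier = list(starting)
--     for _ in range(500 - count):
--         seen = set()
--         nxt = []
--         for x, y in frontier:
--             for p in ((x - 1, y), (x + 1, y), (x, y - 1), (x, y + 1)):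
--                 if L[p[0] % 11][p[1] % 11] != '#' and p not in seen:
--                     seen.add(p)
--                     nxt.append(p)
--         frontier = nxt
--     return frontier
-- ===== Notes on version B (the rewrite author's own statement) =====
-- stated objective: simpler
-- what changed: The recursion (one call per step, fresh visited/new_starting each call) becomes a plain fuel loop 'for _ in range(500 - count)', and the four copy-pasted neighbour if-blocks become one inner loop over the four offset tuples with a single wall/seen check.
-- outside the precondition, e.g. on tuktuk([], [], -5): A returns [], B returns []; on tuktuk([(1, 1)], ['###########', '#.#########', '###########'], 0): A returns [], B returns []
import Mathlib
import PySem

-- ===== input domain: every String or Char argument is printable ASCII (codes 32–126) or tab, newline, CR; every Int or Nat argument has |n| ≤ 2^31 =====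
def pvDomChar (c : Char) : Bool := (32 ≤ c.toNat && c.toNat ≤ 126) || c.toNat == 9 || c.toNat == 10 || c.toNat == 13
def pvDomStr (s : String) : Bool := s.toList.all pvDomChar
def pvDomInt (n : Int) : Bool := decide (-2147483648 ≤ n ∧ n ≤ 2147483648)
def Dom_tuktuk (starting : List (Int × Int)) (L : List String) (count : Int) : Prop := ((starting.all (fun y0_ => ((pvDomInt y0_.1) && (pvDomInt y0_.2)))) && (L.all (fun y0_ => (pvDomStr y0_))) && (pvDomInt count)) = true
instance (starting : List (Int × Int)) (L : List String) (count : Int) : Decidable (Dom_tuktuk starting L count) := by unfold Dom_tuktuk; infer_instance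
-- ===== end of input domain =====

-- B rewrites A's recursion as a fuel loop and the four copied neighbour if-blocks as one
-- inner loop over the four offsets; same values, no speed claim (equality of RETURN values;
-- neither program mutates its arguments).

-- ===== PORT A =====
-- Python's L[i % 11][j % 11]: the defaults ("" / '#') are reached only where Python raises
-- IndexError, and such inputs are excluded by Pre_tuktuk.
def pvCell (L : List String) (i j : Int) : Char :=
  (PySem.Str.pyGet? (PySem.List.pyGetD L (PySem.Int.mod i 11) "") (PySem.Int.mod j 11)).getD '#'

-- the body of A's for-loop: new_starting/visited threaded through four sequential if-blocks
def tuktukStep (L : List String) (starting : List (Int × Int)) :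
    List (Int × Int) × PySem.Set (Int × Int) :=
  starting.foldl
    (fun st xy =>
      let x := xy.1
      let y := xy.2
      let st :=
        if pvCell L (x - 1) y != '#' && !(PySem.Set.contains st.2 (x - 1, y)) then
          (st.1 ++ [(x - 1, y)], PySem.Set.add st.2 (x - 1, y))
        else st
      let st :=
        if pvCell L (x + 1) y != '#' && !(PySem.Set.contains st.2 (x + 1, y)) then
          (st.1 ++ [(x + 1, y)], PySem.Set.add st.2 (x + 1, y))
        else st
      let st :=
        if pvCell L x (y - 1) != '#' && !(PySem.Set.contains st.2 (x, y - 1)) then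
          (st.1 ++ [(x, y - 1)], PySem.Set.add st.2 (x, y - 1))
        else st
      if pvCell L x (y + 1) != '#' && !(PySem.Set.contains st.2 (x, y + 1)) then
        (st.1 ++ [(x, y + 1)], PySem.Set.add st.2 (x, y + 1))
      else st)
    ([], PySem.Set.empty)

def tuktuk (starting : List (Int × Int)) (L : List String) (count : Int) : List (Int × Int) :=
  if h : count < 500 then tuktuk (tuktukStep L starting).1 L (count + 1) else starting
termination_by (500 - count).toNat
decreasing_by omega

-- ===== PORT B =====
-- one frontier step: inner loop over the four neighbour offsets
def tuktukAltStep (L : List String) (frontier : List (Int × Int)) : List (Int × Int) :=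
  (frontier.foldl
    (fun acc xy =>
      let x := xy.1
      let y := xy.2
      [(x - 1, y), (x + 1, y), (x, y - 1), (x, y + 1)].foldl
        (fun acc p =>
          if pvCell L p.1 p.2 != '#' && !(PySem.Set.contains acc.2 p) then
            (acc.1 ++ [p], PySem.Set.add acc.2 p)
          else acc)
        acc)
    ([], PySem.Set.empty)).1

-- 'for _ in range(500 - count)': fuel loop
def tuktukAltLoop (L : List String) : Nat → List (Int × Int) → List (Int × Int)
  | 0, frontier => frontier
  | n + 1, frontier => tuktukAltLoop L n (tuktukAltStep L frontier)

def tuktuk_alt (starting : List (Int × Int)) (L : List String) (count : Int) : List (Int × Int) :=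
  tuktukAltLoop L (500 - count).toNat starting

-- ===== PRECONDITION & SPEC =====
-- Pre_ excludes (a) negative count — for sufficiently negative count A's recursion exhausts
-- CPython's recursion limit (RecursionError); the exact threshold is an interpreter artefact,
-- so all negative counts are excluded — and (b) nonempty frontiers over grids without 11 rows
-- of length ≥ 11, where A's modulo-11 indexing generally raises IndexError (the 11-row/11-column
-- bound is sufficient for index-safety, slightly wider than the accesses a walled-in frontier
-- actually makes); on both kinds of excluded input A occasionally still returns — see the cites.
def Pre_tuktuk (starting : List (Int × Int)) (L : List String) (count : Int) : Prop :=
  500 ≤ count ∨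
    (0 ≤ count ∧
      (starting = [] ∨ (11 ≤ L.length ∧ ∀ r ∈ L.take 11, 11 ≤ PySem.Str.len r)))
instance (starting : List (Int × Int)) (L : List String) (count : Int) : Decidable (Pre_tuktuk starting L count) := by unfold Pre_tuktuk; infer_instance

def pvWitness_tuktuk : (List (Int × Int)) × List String × Int :=
  ([(1, 1)],
   ["...........", ".#.......#.", "...........", "...........", "...........",
    "...........", "...........", "...........", "...........", ".#.......#.",
    "..........."],
   499)

def Spec_tuktuk (starting : List (Int × Int)) (L : List String) (count : Int) (out : List (Int × Int)) : Prop := out = tuktuk_alt starting L count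
instance (starting : List (Int × Int)) (L : List String) (count : Int) (out : List (Int × Int)) : Decidable (Spec_tuktuk starting L count out) := by unfold Spec_tuktuk; infer_instance

-- ===== CLAIM (what is proved, stated in full; the proofs are below) =====
def Claim_equal_tuktuk : Prop := ∀ (starting : List (Int × Int)) (L : List String) (count : Int), Dom_tuktuk starting L count → Pre_tuktuk starting L count → Spec_tuktuk starting L count (tuktuk starting L count)

-- ===== LEMMAS AND PROOFS =====

-- A's four sequential if-blocks are B's fold over the literal four-offset list
theorem step_eq (L : List String) (f : List (Int × Int)) :
    (tuktukStep L f).1 = tuktukAltStep L f := rfl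

theorem loop_eq (L : List String) :
    ∀ (n : Nat) (count : Int) (s : List (Int × Int)), (500 - count).toNat = n →
      tuktuk s L count = tuktukAltLoop L n s := by
  intro n
  induction n with
  | zero =>
    intro c s h
    rw [tuktuk, dif_neg (by omega : ¬ c < 500)]
    rfl
  | succ n ih =>
    intro c s h
    rw [tuktuk, dif_pos (by omega : c < 500)]
    rw [ih (c + 1) _ (by omega), step_eq]
    rfl

-- ===== VERDICT (by name: the statement is the Claim_ definition above) =====
theorem tuktuk_spec : Claim_equal_tuktuk := by
  intro starting L count _dom _pre
  unfold Spec_tuktuk tuktuk_alt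
  exact loop_eq L _ count starting rfl
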